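-- pv_equiv track=rewrite | github.com/V1SHV3SH/Python-Problem-Statements-DSA | LeetCode/nc.py | f
-- ===== SOURCE A (Python) =====
-- def f(n: int) -> int:
--     c = 0
--     i=0
--     while n >= 0:
--         n -= 2
--         c += n - 2
--         i+=1# This part is ambiguous, but keeping it as in the pseudocode
--     return c,i
-- ===== SOURCE B (Python) =====
-- def f(n: int) -> int:
--     if n < 0:
--         return 0, 0
--     k = n // 2 + 1
--     return k * (n - 2) - k * (k + 1), k
-- ===== Notes on version B (the rewrite author's own statement) =====
-- stated objective: faster
-- what changed: Replaced A's linear while-loop (repeated decrement with a running counter and sum) by a constant-time closed-form arithmetic computation of both the iteration count and the accumulated sum.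
import Mathlib
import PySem

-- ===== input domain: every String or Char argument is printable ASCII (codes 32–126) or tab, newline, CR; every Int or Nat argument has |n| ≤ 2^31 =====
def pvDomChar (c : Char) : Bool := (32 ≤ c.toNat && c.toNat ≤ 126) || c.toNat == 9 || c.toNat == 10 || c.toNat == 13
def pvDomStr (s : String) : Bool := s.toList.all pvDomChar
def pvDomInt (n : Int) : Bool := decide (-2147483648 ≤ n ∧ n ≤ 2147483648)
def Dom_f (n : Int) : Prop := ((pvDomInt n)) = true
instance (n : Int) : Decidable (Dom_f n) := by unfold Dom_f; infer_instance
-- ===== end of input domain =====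

-- B replaces A's O(n) while-loop by a closed-form O(1) arithmetic formula (return value equivalence).

-- ===== PORT A =====
-- A's while loop: n -= 2; c += n - 2; i += 1, while n >= 0
def fLoop (n c i : Int) : Int × Int :=
  if h : n ≥ 0 then fLoop (n - 2) (c + ((n - 2) - 2)) (i + 1) else (c, i)
termination_by (n + 2).toNat
decreasing_by omega

def f (n : Int) : Int × Int := fLoop n 0 0

-- ===== PORT B =====
def f_alt (n : Int) : Int × Int :=
  if n < 0 then (0, 0)
  else
    let k := PySem.Int.floordiv n 2 + 1
    (k * (n - 2) - k * (k + 1), k)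

-- ===== PRECONDITION & SPEC =====
def Spec_f (n : Int) (out : Int × Int) : Prop := out = f_alt n
instance (n : Int) (out : Int × Int) : Decidable (Spec_f n out) := by unfold Spec_f; infer_instance

-- ===== CLAIM (what is proved, stated in full; the proofs are below) =====
def Claim_equal_f : Prop := ∀ (n : Int), Dom_f n → Spec_f n (f n)

-- ===== LEMMAS AND PROOFS =====

lemma fLoop_neg (n c i : Int) (h : n < 0) : fLoop n c i = (c, i) := by
  rw [fLoop]; simp [not_le.mpr h]

lemma fLoop_closed : ∀ (m : Nat) (n c i : Int), 0 ≤ n → n ≤ (m : Int) →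
    fLoop n c i = (c + (n / 2 + 1) * (n - 2) - (n / 2 + 1) * (n / 2 + 2),
                   i + (n / 2 + 1)) := by
  intro m
  induction m with
  | zero =>
    intro n c i h0 hm
    have hn : n = 0 := by omega
    subst hn
    rw [fLoop]
    simp only [show (0:Int) ≥ 0 from by omega, dif_pos]
    rw [fLoop_neg _ _ _ (by omega)]
    simp only [Prod.mk.injEq]
    constructor <;> omega
  | succ m ih =>
    intro n c i h0 hm
    rw [fLoop]
    simp only [dif_pos (show n ≥ 0 from h0)]
    by_cases h2 : n - 2 < 0
    · rw [fLoop_neg _ _ _ h2]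
      have : n / 2 = 0 := by omega
      rw [this]; simp only [Prod.mk.injEq]; constructor <;> ring_nf
    · rw [ih (n - 2) _ _ (by omega) (by omega)]
      have hdiv : (n - 2) / 2 = n / 2 - 1 := by omega
      rw [hdiv]
      simp only [Prod.mk.injEq]; constructor <;> ring

-- ===== VERDICT (by name: the statement is the Claim_ definition above) =====
theorem f_spec : Claim_equal_f := by
  intro n _
  unfold Spec_f f f_alt
  by_cases h : n < 0
  · rw [fLoop_neg _ _ _ h]; simp [h]
  · rw [fLoop_closed n.toNat n 0 0 (by omega) (by omega)]
    rw [if_neg h, PySem.Int.floordiv_eq_ediv_of_pos (by omega)]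
    simp only [Prod.mk.injEq]
    constructor <;> ring
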